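-- pv_equiv track=rewrite | github.com/malikobeidin/maryam | random_ie.py | relator_walk
-- ===== SOURCE A (Python) =====
-- def relator_walk(relator):
--     x,y = (0,0)
--     walk = [(x,y)]
--     for letter in relator:
--         if letter == 'a':
--             x,y = x+1,y
--         if letter == 'A':
--             x,y = x-1,y
--         if letter == 'b':
--             x,y = x,y+1
--         if letter == 'B':
--             x,y = x,y-1
--         walk.append((x,y))
--     return walk
-- ===== SOURCE B (Python) =====
-- _DELTA = {'a': (1, 0), 'A': (-1, 0), 'b': (0, 1), 'B': (0, -1)}
--
-- def relator_walk(relator):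
--     # Walk backwards from the (unknown) endpoint: scan the word from its last
--     # letter to its first, accumulating the displacement of each position
--     # RELATIVE TO THE ENDPOINT (subtracting deltas), then translate the whole
--     # reversed walk by the negated total displacement so it starts at (0, 0).
--     x, y = 0, 0
--     rel = [(0, 0)]
--     for c in reversed(relator):
--         dx, dy = _DELTA.get(c, (0, 0))
--         x -= dx
--         y -= dy
--         rel.append((x, y))
--     tx, ty = -x, -y
--     return [(u + tx, v + ty) for (u, v) in reversed(rel)]
-- ===== Notes on version B (the rewrite author's own statement) =====
-- stated objective: alternative
-- what changed: A walks forward maintaining the current position through four sequential if-branches; B scans the word from the last letter to the first, accumulating each position's displacement relative to the endpoint, and then translates the reversed list by the negated total so the walk starts at the origin.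
import Mathlib
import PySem

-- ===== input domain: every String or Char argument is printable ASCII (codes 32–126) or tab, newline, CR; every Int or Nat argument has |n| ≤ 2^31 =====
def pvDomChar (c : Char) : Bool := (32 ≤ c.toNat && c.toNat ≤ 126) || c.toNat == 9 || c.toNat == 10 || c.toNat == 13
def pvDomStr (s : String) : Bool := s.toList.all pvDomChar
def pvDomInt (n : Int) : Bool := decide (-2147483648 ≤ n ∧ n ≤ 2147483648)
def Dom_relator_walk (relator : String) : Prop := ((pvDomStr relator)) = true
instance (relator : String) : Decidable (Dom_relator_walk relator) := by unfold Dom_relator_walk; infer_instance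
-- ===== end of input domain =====

-- Instead of A's forward pass over the word, B scans the word backwards, accumulating each
-- position's displacement relative to the endpoint, then translates the reversed list by the
-- negated total so the walk starts at the origin; objective: alternative.

-- ===== PORT A =====
-- state: (x, y, walk); the four ifs are applied in sequence exactly as in the Python
def relator_walk_step (st : Int × Int × List (Int × Int)) (letter : Char) :
    Int × Int × List (Int × Int) :=
  let x := st.1
  let y := st.2.1
  let walk := st.2.2
  let p1 : Int × Int := if letter = 'a' then (x + 1, y) else (x, y)
  let p2 : Int × Int := if letter = 'A' then (p1.1 - 1, p1.2) else p1
  let p3 : Int × Int := if letter = 'b' then (p2.1, p2.2 + 1) else p2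
  let p4 : Int × Int := if letter = 'B' then (p3.1, p3.2 - 1) else p3
  (p4.1, p4.2, walk ++ [(p4.1, p4.2)])

def relator_walk (relator : String) : List (Int × Int) :=
  (relator.toList.foldl relator_walk_step (0, 0, [((0 : Int), (0 : Int))])).2.2

-- ===== PORT B =====
def relator_walk_delta (c : Char) : Int × Int :=
  if c = 'a' then (1, 0)
  else if c = 'A' then (-1, 0)
  else if c = 'b' then (0, 1)
  else if c = 'B' then (0, -1)
  else (0, 0)

-- translate a point by a delta (the list comprehension's body)
def relator_walk_shift (d p : Int × Int) : Int × Int := (p.1 + d.1, p.2 + d.2)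

-- one step of the backward loop: subtract the letter's delta, append the relative point
def relator_walk_alt_step (st : Int × Int × List (Int × Int)) (c : Char) :
    Int × Int × List (Int × Int) :=
  let d := relator_walk_delta c
  (st.1 - d.1, st.2.1 - d.2, st.2.2 ++ [(st.1 - d.1, st.2.1 - d.2)])

def relator_walk_alt (relator : String) : List (Int × Int) :=
  let st := relator.toList.reverse.foldl relator_walk_alt_step
    ((0 : Int), (0 : Int), [((0 : Int), (0 : Int))])
  st.2.2.reverse.map (relator_walk_shift (-st.1, -st.2.1))

-- ===== PRECONDITION & SPEC =====
def Spec_relator_walk (relator : String) (out : List (Int × Int)) : Prop := out = relator_walk_alt relator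
instance (relator : String) (out : List (Int × Int)) : Decidable (Spec_relator_walk relator out) := by unfold Spec_relator_walk; infer_instance

-- ===== CLAIM (what is proved, stated in full; the proofs are below) =====
def Claim_equal_relator_walk : Prop := ∀ (relator : String), Dom_relator_walk relator → Spec_relator_walk relator (relator_walk relator)

-- ===== LEMMAS AND PROOFS =====

-- the canonical walk as a foldr (suffix-walk), used as a bridge between the two ports
def relator_walk_W (l : List Char) : List (Int × Int) :=
  l.foldr (fun c walk => ((0 : Int), (0 : Int)) :: walk.map (relator_walk_shift (relator_walk_delta c)))
    [((0 : Int), (0 : Int))]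

theorem relator_walk_W_head (l : List Char) :
    relator_walk_W l = ((0 : Int), (0 : Int)) :: (relator_walk_W l).tail := by
  cases l <;> simp [relator_walk_W]

-- A's four sequential ifs compute exactly "translate the position by the letter's delta"
theorem relator_walk_step_eq (st : Int × Int × List (Int × Int)) (c : Char) :
    relator_walk_step st c =
      ((relator_walk_shift (relator_walk_delta c) (st.1, st.2.1)).1,
       (relator_walk_shift (relator_walk_delta c) (st.1, st.2.1)).2,
       st.2.2 ++ [relator_walk_shift (relator_walk_delta c) (st.1, st.2.1)]) := by
  obtain ⟨x, y, w⟩ := st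
  simp only [relator_walk_step, relator_walk_delta, relator_walk_shift]
  split_ifs <;> simp_all <;> omega

-- invariant of A: the fold from position p appends p translated over the suffix-walk (minus its head)
theorem relator_walk_fold (l : List Char) (p : Int × Int) (acc : List (Int × Int)) :
    (l.foldl relator_walk_step (p.1, p.2, acc)).2.2 =
      acc ++ ((relator_walk_W l).map (relator_walk_shift p)).tail := by
  induction l generalizing p acc with
  | nil => simp [relator_walk_W]
  | cons c l ih =>
    simp only [List.foldl_cons]
    rw [relator_walk_step_eq, ih]
    have hW : relator_walk_W (c :: l) =
        ((0 : Int), (0 : Int)) ::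
          (relator_walk_W l).map (relator_walk_shift (relator_walk_delta c)) := by
      simp [relator_walk_W]
    rw [hW, List.map_cons, List.tail_cons, List.map_map]
    have hfun : relator_walk_shift p ∘ relator_walk_shift (relator_walk_delta c)
        = relator_walk_shift (relator_walk_shift (relator_walk_delta c) (p.1, p.2)) := by
      funext q
      simp only [Function.comp_apply, relator_walk_shift, Prod.mk.injEq]
      constructor <;> ring
    rw [hfun]
    conv_rhs => rw [relator_walk_W_head l]
    rw [List.map_cons]
    simp [relator_walk_shift]

theorem relator_walk_A_eq_W (relator : String) :
    relator_walk relator = relator_walk_W relator.toList := by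
  unfold relator_walk
  rw [show ((0 : Int), (0 : Int), [((0 : Int), (0 : Int))]) =
        ((((0 : Int), (0 : Int)) : Int × Int).1, (((0 : Int), (0 : Int)) : Int × Int).2,
          [((0 : Int), (0 : Int))]) from rfl,
    relator_walk_fold]
  have hid : (relator_walk_W relator.toList).map (relator_walk_shift ((0 : Int), (0 : Int)))
      = relator_walk_W relator.toList := by
    conv_lhs => rw [show relator_walk_shift ((0 : Int), (0 : Int)) = fun p => p by
      funext q; simp [relator_walk_shift]]
    exact List.map_id' _
  rw [hid, List.singleton_append]
  exact (relator_walk_W_head relator.toList).symm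

-- B's backward fold, on lists (for induction)
def relator_walk_B (l : List Char) : Int × Int × List (Int × Int) :=
  l.reverse.foldl relator_walk_alt_step ((0 : Int), (0 : Int), [((0 : Int), (0 : Int))])

theorem relator_walk_B_cons (c : Char) (l : List Char) :
    relator_walk_B (c :: l) = relator_walk_alt_step (relator_walk_B l) c := by
  simp [relator_walk_B, List.foldl_append]

-- B's relative points, reversed and translated by the negated total, are the walk
theorem relator_walk_B_eq_W (l : List Char) :
    ((relator_walk_B l).2.2.reverse.map
        (relator_walk_shift (-(relator_walk_B l).1, -(relator_walk_B l).2.1))) =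
      relator_walk_W l := by
  induction l with
  | nil => simp [relator_walk_B, relator_walk_W, relator_walk_shift]
  | cons c l ih =>
    rw [relator_walk_B_cons]
    rcases hB : relator_walk_B l with ⟨x, y, rel⟩
    rw [hB] at ih
    simp only [relator_walk_alt_step, List.reverse_append, List.reverse_cons,
      List.reverse_nil, List.nil_append, List.cons_append, List.map_cons] at *
    have hW : relator_walk_W (c :: l) =
        ((0 : Int), (0 : Int)) ::
          (relator_walk_W l).map (relator_walk_shift (relator_walk_delta c)) := by
      simp [relator_walk_W]
    rw [hW, ← ih, List.map_map]
    have hfun : relator_walk_shift (relator_walk_delta c) ∘ relator_walk_shift (-x, -y)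
        = relator_walk_shift (-(x - (relator_walk_delta c).1), -(y - (relator_walk_delta c).2)) := by
      funext q
      simp only [Function.comp_apply, relator_walk_shift, Prod.mk.injEq]
      constructor <;> ring
    rw [hfun]
    simp [relator_walk_shift]

-- ===== VERDICT (by name: the statement is the Claim_ definition above) =====
theorem relator_walk_spec : Claim_equal_relator_walk := by
  intro relator _
  unfold Spec_relator_walk
  rw [relator_walk_A_eq_W]
  unfold relator_walk_alt
  exact (relator_walk_B_eq_W relator.toList).symm
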